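-- pv_equiv track=rewrite | github.com/Voldezhur/Discrete2ndSemester | Пр 2/main.py | addNumber
-- ===== SOURCE A (Python) =====
-- def addNumber(symbols):  # Старая функция, просто делила пополам
--     if len(symbols) <= 1:  # Если длина массива 1 или меньше - дошли до конца
--         return symbols
--
--     # Делим массив на две части
--     A = symbols[:int(len(symbols)/2)]
--     B = symbols[int(len(symbols)/2):]
--
--     # К первой части добавляем нули, ко второй единицы
--     for i in range(len(A)):
--         A[i] += '0'
--     for i in range(len(B)):
--         B[i] += '1'
--
--     # Обновляем массив
--     symbols = addNumber(A) + addNumber(B)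
--
--     return symbols
-- ===== SOURCE B (Python) =====
-- def addNumber(symbols):
--     if len(symbols) <= 1:
--         return symbols
--     n = len(symbols)
--     out = []
--     for i in range(n):
--         lo, hi = 0, n
--         bits = []
--         while hi - lo > 1:
--             m = (hi - lo) // 2
--             if i - lo < m:
--                 bits.append('0')
--                 hi = lo + m
--             else:
--                 bits.append('1')
--                 lo = lo + m
--         out.append(symbols[i] + ''.join(bits))
--     return out
-- ===== Notes on version B (the rewrite author's own statement) =====
-- stated objective: alternative
-- what changed: Replaces A's recursive list-halving (building sliced copies and re-appending bits level by level) with a direct per-element computation: each index's code is found by interval bisection on [0,n), so no intermediate lists are built.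
import Mathlib
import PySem

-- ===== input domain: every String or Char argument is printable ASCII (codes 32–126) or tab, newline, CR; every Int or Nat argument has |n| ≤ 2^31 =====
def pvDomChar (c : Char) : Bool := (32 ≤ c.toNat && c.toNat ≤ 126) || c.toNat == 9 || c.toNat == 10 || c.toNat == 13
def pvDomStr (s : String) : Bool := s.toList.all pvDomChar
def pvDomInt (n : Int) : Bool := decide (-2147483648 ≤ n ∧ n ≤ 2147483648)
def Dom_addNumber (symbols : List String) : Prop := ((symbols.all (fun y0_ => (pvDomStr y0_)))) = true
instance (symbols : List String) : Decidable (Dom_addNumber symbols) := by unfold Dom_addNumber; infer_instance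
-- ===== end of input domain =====

-- B replaces A's recursive halving with a per-index interval-bisection code computation (alternative decomposition, same cost).

-- ===== PORT A =====
-- A recurses on the two halves after appending '0'/'1'; recursion on list length.
def addNumber (symbols : List String) : List String :=
  if _h : symbols.length ≤ 1 then
    symbols
  else
    let m := symbols.length / 2
    let A := symbols.take m
    let B := symbols.drop m
    let A' := A.map (fun s => s ++ "0")
    let B' := B.map (fun s => s ++ "1")
    addNumber A' ++ addNumber B'
termination_by symbols.length
decreasing_by
  · simp; omega
  · simp; omega

-- ===== PORT B =====
-- the while loop of Source B: bisect [lo,hi) until width 1, collecting bits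
def pvBits (i lo hi : Nat) : String :=
  if _h : hi - lo > 1 then
    if i - lo < (hi - lo) / 2 then
      "0" ++ pvBits i lo (lo + (hi - lo) / 2)
    else
      "1" ++ pvBits i (lo + (hi - lo) / 2) hi
  else
    ""
termination_by hi - lo
decreasing_by
  · omega
  · omega

def addNumber_alt (symbols : List String) : List String :=
  if symbols.length ≤ 1 then
    symbols
  else
    (List.range symbols.length).map (fun i => symbols.getD i "" ++ pvBits i 0 symbols.length)

-- ===== PRECONDITION & SPEC =====
def Spec_addNumber (symbols : List String) (out : List String) : Prop := out = addNumber_alt symbols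
instance (symbols : List String) (out : List String) : Decidable (Spec_addNumber symbols out) := by unfold Spec_addNumber; infer_instance

-- ===== CLAIM (what is proved, stated in full; the proofs are below) =====
def Claim_equal_addNumber : Prop := ∀ (symbols : List String), Dom_addNumber symbols → Spec_addNumber symbols (addNumber symbols)

-- ===== LEMMAS AND PROOFS =====

-- bisection is translation-invariant
theorem pvBits_shift (a : Nat) : ∀ w i lo hi, hi - lo = w → pvBits (a + i) (a + lo) (a + hi) = pvBits i lo hi := by
  intro w
  induction w using Nat.strong_induction_on with
  | _ w ih =>
    intro i lo hi hw
    conv_lhs => rw [pvBits]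
    conv_rhs => rw [pvBits]
    have hsub : (a + hi) - (a + lo) = hi - lo := by omega
    have hi' : (a + i) - (a + lo) = i - lo := by omega
    rw [hsub, hi']
    by_cases h : hi - lo > 1
    · rw [dif_pos h, dif_pos h]
      by_cases hc : i - lo < (hi - lo) / 2
      · rw [if_pos hc, if_pos hc]
        congr 1
        rw [show a + lo + (hi - lo) / 2 = a + (lo + (hi - lo) / 2) by omega]
        exact ih ((lo + (hi - lo) / 2) - lo) (by omega) i lo _ rfl
      · rw [if_neg hc, if_neg hc]
        congr 1
        rw [show a + lo + (hi - lo) / 2 = a + (lo + (hi - lo) / 2) by omega]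
        exact ih (hi - (lo + (hi - lo) / 2)) (by omega) i _ hi rfl
    · rw [dif_neg h, dif_neg h]

theorem pvBits_left {i n : Nat} (h1 : 1 < n) (h2 : i < n / 2) :
    pvBits i 0 n = "0" ++ pvBits i 0 (n / 2) := by
  rw [pvBits]
  simp [h1, h2]

theorem pvBits_right {j m n : Nat} (h1 : 1 < n) (hm : m = n / 2) :
    pvBits (m + j) 0 n = "1" ++ pvBits j 0 (n - m) := by
  rw [pvBits]
  simp only [Nat.sub_zero]
  rw [dif_pos h1, if_neg (by omega : ¬ (m + j < n / 2))]
  congr 1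
  have h2 : m + (n - m) = n := by omega
  have hs := pvBits_shift m (n - m) j 0 (n - m) (by omega)
  rw [Nat.add_zero, h2] at hs
  rw [show 0 + n / 2 = m by omega]
  exact hs

-- main characterisation of A as the per-index bisection code
theorem addNumber_eq : ∀ (w : Nat) (xs : List String), xs.length = w →
    addNumber xs = (List.range w).map (fun i => xs.getD i "" ++ pvBits i 0 w) := by
  intro w
  induction w using Nat.strong_induction_on with
  | _ w ih =>
    intro xs hw
    by_cases h : xs.length ≤ 1
    · have hx : addNumber xs = xs := by rw [addNumber]; simp [h]
      rw [hx]
      rcases xs with _ | ⟨s, rest⟩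
      · have hw0 : w = 0 := by simp at hw; omega
        subst hw0; simp
      · have hr : rest = [] := by
          cases rest with
          | nil => rfl
          | cons t ts => simp at h
        subst hr
        have hw1 : w = 1 := by simp at hw; omega
        subst hw1
        have hb : pvBits 0 0 1 = "" := by rw [pvBits]; simp
        simp [List.range_one, hb]
    · rw [addNumber, dif_neg h]
      simp only [hw]
      have h1 : 1 < w := by omega
      have hml : ((xs.take (w / 2)).map (fun s => s ++ "0")).length = w / 2 := by
        simp; omega
      have hbl : ((xs.drop (w / 2)).map (fun s => s ++ "1")).length = w - w / 2 := by
        simp; omega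
      rw [ih (w / 2) (by omega) _ hml, ih (w - w / 2) (by omega) _ hbl]
      have hrange : List.range w
          = List.range (w / 2) ++ (List.range (w - w / 2)).map (fun j => w / 2 + j) := by
        rw [← List.range_add]; congr 1; omega
      rw [hrange, List.map_append]
      congr 1
      · apply List.map_congr_left
        intro i hi
        simp only [List.mem_range] at hi
        have hgt : ((xs.take (w / 2)).map (fun s => s ++ "0")).getD i "" = xs.getD i "" ++ "0" := by
          have hilt : i < xs.length := by omega
          rw [List.getD_eq_getElem?_getD, List.getD_eq_getElem?_getD]
          simp [hi, hilt]
        rw [hgt, pvBits_left h1 hi]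
        simp [String.append_assoc]
      · simp only [List.map_map]
        apply List.map_congr_left
        intro j hj
        simp only [List.mem_range] at hj
        simp only [Function.comp]
        have hgt : ((xs.drop (w / 2)).map (fun s => s ++ "1")).getD j "" = xs.getD (w / 2 + j) "" ++ "1" := by
          have hlt : w / 2 + j < xs.length := by omega
          rw [List.getD_eq_getElem?_getD, List.getD_eq_getElem?_getD]
          simp [List.getElem?_drop, hlt]
        rw [hgt, pvBits_right h1 rfl]
        simp [String.append_assoc]

-- ===== VERDICT (by name: the statement is the Claim_ definition above) =====
theorem addNumber_spec : Claim_equal_addNumber := by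
  intro xs _
  unfold Spec_addNumber addNumber_alt
  by_cases h : xs.length ≤ 1
  · rw [addNumber]; simp [h]
  · simp only [h, if_neg, not_false_iff]
    exact addNumber_eq xs.length xs rfl
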